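-- pv_equiv track=rewrite | github.com/yunzz999/wiki-ICM | 3°er Semestre/LP/LP 2025/Laboratorios/Lab 6/5.py | new_word
-- ===== SOURCE A (Python) =====
-- def new_word(s):
--     l=["a","e","i","o","u","A","E","I","O","U"," "]
--     x=""
--     for i in range(len(s)):
--         if(s[i] not in l):
--             x+="*"
--
--         else:
--             x+=s[i]
--     return x
-- ===== SOURCE B (Python) =====
-- import re
--
-- def new_word(s):
--     return re.sub(r'[^aeiouAEIOU ]', '*', s)
-- ===== Notes on version B (the rewrite author's own statement) =====
-- stated objective: idiomatic
-- what changed: Replaced the indexed loop with string concatenation by a single re.sub with the complement character class [^aeiouAEIOU ], letting the regex engine do the scan-and-replace.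
import Mathlib
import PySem

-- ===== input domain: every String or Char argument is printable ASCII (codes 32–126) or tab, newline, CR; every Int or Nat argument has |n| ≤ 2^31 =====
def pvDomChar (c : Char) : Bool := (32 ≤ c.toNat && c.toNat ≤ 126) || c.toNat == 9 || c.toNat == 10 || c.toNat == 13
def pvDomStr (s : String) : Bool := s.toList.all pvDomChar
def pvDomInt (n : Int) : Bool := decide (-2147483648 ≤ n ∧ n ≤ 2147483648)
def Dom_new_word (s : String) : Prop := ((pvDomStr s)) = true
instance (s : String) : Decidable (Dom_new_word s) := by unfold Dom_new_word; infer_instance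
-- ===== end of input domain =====

-- B replaces A's indexed loop with a re.sub over the complement class [^aeiouAEIOU ] (idiomatic).


-- ===== PORT A =====
-- for i in range(len(s)): x += "*" if s[i] not in l else s[i]
def new_word (s : String) : String :=
  let l : List Char := ['a','e','i','o','u','A','E','I','O','U',' ']
  let cs : List Char := s.toList
  (PySem.List.pyRange 0 cs.length 1).foldl
    (fun x i =>
      let c := PySem.List.pyGetD cs i ' '   -- s[i]: index always in range here
      if c ∉ l then x ++ "*" else x ++ String.ofList [c]) ""

-- ===== PORT B =====
-- re.sub(r'[^aeiouAEIOU ]', '*', s): the pattern matches exactly one character outside the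
-- class, so the substitution is exact per-character replacement (hand port; exact because the
-- regex is a single-character class and the replacement is a literal).
def pvKeepChar (c : Char) : Bool := c ∈ (['a','e','i','o','u','A','E','I','O','U',' '] : List Char)

def new_word_alt (s : String) : String :=
  String.ofList (s.toList.map (fun c => if pvKeepChar c then c else '*'))

-- ===== PRECONDITION & SPEC =====
def Spec_new_word (s : String) (out : String) : Prop := out = new_word_alt s
instance (s : String) (out : String) : Decidable (Spec_new_word s out) := by unfold Spec_new_word; infer_instance

-- ===== CLAIM (what is proved, stated in full; the proofs are below) =====
def Claim_equal_new_word : Prop := ∀ (s : String), Dom_new_word s → Spec_new_word s (new_word s)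

-- ===== LEMMAS AND PROOFS =====

theorem pv_foldl_build (cs : List Char) (a : String) :
    cs.foldl
      (fun x c => if c ∉ (['a','e','i','o','u','A','E','I','O','U',' '] : List Char)
                  then x ++ "*" else x ++ String.ofList [c]) a
    = a ++ String.ofList (cs.map (fun c => if pvKeepChar c then c else '*')) := by
  induction cs generalizing a with
  | nil => apply String.toList_injective; simp
  | cons c t ih =>
    simp only [List.foldl_cons, List.map_cons]
    by_cases h : pvKeepChar c
    · have h' : c ∈ (['a','e','i','o','u','A','E','I','O','U',' '] : List Char) := by
        simpa [pvKeepChar] using h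
      rw [if_neg (by simp [h']), ih]
      apply String.toList_injective; simp [h]
    · have h' : c ∉ (['a','e','i','o','u','A','E','I','O','U',' '] : List Char) := by
        simpa [pvKeepChar] using h
      rw [if_pos h', ih]
      apply String.toList_injective; simp [h]

-- ===== VERDICT (by name: the statement is the Claim_ definition above) =====
theorem new_word_spec : Claim_equal_new_word := by
  intro s _
  show new_word s = new_word_alt s
  unfold new_word new_word_alt
  simp only []
  rw [PySem.List.foldl_pyRange_zero_pyGetD' s.toList ' '
        (fun x c => if c ∉ (['a','e','i','o','u','A','E','I','O','U',' '] : List Char)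
                  then x ++ "*" else x ++ String.ofList [c]) ""]
  rw [pv_foldl_build]
  apply String.toList_injective; simp
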